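-- pv_equiv track=rewrite | github.com/rlauff/rhombic_strips | lattices/associahedron.py | find_flip_gray_code
-- ===== SOURCE A (Python) =====
-- def find_flip_gray_code(triangulations):
--     """
--     Findet einen Gray-Code (Hamiltonschen Pfad) im Flip-Graphen
--     der Triangulierungen mittels DFS und Warnsdorffs Heuristik.
--     """
--     if not triangulations:
--         return []
--
--     n_tris = len(triangulations)
--
--     # 1. Adjazenzliste (Flip-Graph) aufbauen
--     adj = {i: [] for i in range(n_tris)}
--     for i in range(n_tris):
--         for j in range(i + 1, n_tris):
--             # Ein Flip bedeutet, dass sich die Triangulierungen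
--             # in genau einer Diagonale unterscheiden
--             set_i = set(triangulations[i])
--             set_j = set(triangulations[j])
--             if len(set_i.intersection(set_j)) == len(set_i) - 1:
--                 adj[i].append(j)
--                 adj[j].append(i)
--
--     # 2. Hamiltonschen Pfad suchen
--     path = []
--     visited = set()
--
--     def dfs(curr):
--         path.append(curr)
--         visited.add(curr)
--
--         if len(path) == n_tris:
--             return True
--
--         # Warnsdorffs Heuristik: Besuche Nachbarn mit den wenigsten unbesuchten Nachbarn zuerst
--         neighbors = []
--         for nxt in adj[curr]:
--             if nxt not in visited:
--                 deg = sum(1 for nn in adj[nxt] if nn not in visited)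
--                 neighbors.append((deg, nxt))
--         neighbors.sort() # Sortiert nach Grad (deg) aufsteigend
--
--         for deg, nxt in neighbors:
--             if dfs(nxt):
--                 return True
--
--         path.pop()
--         visited.remove(curr)
--         return False
--
--     # Wir starten beim ersten Knoten
--     dfs(0)
--
--     return [triangulations[i] for i in path]
-- ===== SOURCE B (Python) =====
-- def find_flip_gray_code(triangulations):
--     """Same Gray-code search, but the flip-graph is built with an inverted
--     index (diagonal -> triangulations containing it) and pair counting
--     instead of computing a set intersection for every pair."""
--     if not triangulations:
--         return []
--
--     n_tris = len(triangulations)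
--
--     # 1a. Inverted index: diagonal -> ascending list of triangulation indices
--     #     containing it (each index once), plus the set-size of each triangulation.
--     occ = {}
--     sizes = []
--     for idx, tri in enumerate(triangulations):
--         distinct = list(dict.fromkeys(tri))
--         sizes.append(len(distinct))
--         for d in distinct:
--             occ[d] = occ.get(d, []) + [idx]
--
--     # 1b. cnt[(i, j)] = |set_i & set_j| for i < j, via pair counting per diagonal.
--     cnt = {}
--     for lst in occ.values():
--         rest = lst
--         while rest:
--             x, rest = rest[0], rest[1:]
--             for y in rest:
--                 cnt[(x, y)] = cnt.get((x, y), 0) + 1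
--
--     # 1c. Adjacency: i ~ j  iff  |set_i & set_j| == |set_i| - 1.
--     adj = {i: [] for i in range(n_tris)}
--     for i in range(n_tris):
--         for j in range(i + 1, n_tris):
--             if cnt.get((i, j), 0) == sizes[i] - 1:
--                 adj[i].append(j)
--                 adj[j].append(i)
--
--     # 2. Hamiltonian-path DFS with Warnsdorff's heuristic (unchanged).
--     path = []
--     visited = set()
--
--     def dfs(curr):
--         path.append(curr)
--         visited.add(curr)
--
--         if len(path) == n_tris:
--             return True
--
--         neighbors = []
--         for nxt in adj[curr]:
--             if nxt not in visited:
--                 deg = sum(1 for nn in adj[nxt] if nn not in visited)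
--                 neighbors.append((deg, nxt))
--         neighbors.sort()
--
--         for deg, nxt in neighbors:
--             if dfs(nxt):
--                 return True
--
--         path.pop()
--         visited.remove(curr)
--         return False
--
--     dfs(0)
--
--     return [triangulations[i] for i in path]
-- ===== Notes on version B (the rewrite author's own statement) =====
-- stated objective: faster
-- what changed: The flip-graph is built from an inverted index (diagonal -> list of triangulations containing it) whose buckets are pair-counted to get every intersection size at once, instead of constructing two sets and intersecting them for each of the O(n^2) pairs; the Hamiltonian-path DFS is unchanged.
import Mathlib
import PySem

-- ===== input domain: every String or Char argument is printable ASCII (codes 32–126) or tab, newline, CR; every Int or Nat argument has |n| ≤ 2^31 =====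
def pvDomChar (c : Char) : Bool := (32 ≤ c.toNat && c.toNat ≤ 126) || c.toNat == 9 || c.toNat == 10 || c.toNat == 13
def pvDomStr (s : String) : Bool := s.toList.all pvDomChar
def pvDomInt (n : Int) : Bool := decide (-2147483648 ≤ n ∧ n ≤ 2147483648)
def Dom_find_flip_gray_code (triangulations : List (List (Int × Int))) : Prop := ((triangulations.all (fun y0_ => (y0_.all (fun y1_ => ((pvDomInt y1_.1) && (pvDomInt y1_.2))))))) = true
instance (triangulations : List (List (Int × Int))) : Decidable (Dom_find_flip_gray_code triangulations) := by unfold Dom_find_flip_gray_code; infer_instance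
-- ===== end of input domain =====

-- B replaces A's per-pair set-intersection flip test by an inverted index (diagonal →
-- triangulations containing it) with pair counting; the Hamiltonian-path DFS is the same
-- search in both versions (shared helper pvDfs below).

-- ===== PORT A =====

-- The recursive dfs with the mutable path/visited is ported functionally: it returns
-- `some completePath` exactly when Python's dfs returns True (path then holds that path),
-- and `none` when it returns False (path/visited are restored by the pop/remove backtracking).
-- The fuel only makes the recursion structural; the initial fuel `n_tris` is never exhausted.
def pvDfs (adj : PySem.Dict Int (List Int)) (n : Int) :
    Nat → Int → List Int → PySem.Set Int → Option (List Int)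
  | 0, _, _, _ => none
  | fuel+1, curr, path, visited =>
    let path := path ++ [curr]
    let visited := PySem.Set.add visited curr
    if (path.length : Int) == n then some path
    else
      -- neighbors: [(deg, nxt) for nxt in adj[curr] if nxt not in visited]
      let neighbors : List (Int × Int) :=
        (adj.getD curr []).foldl (fun acc nxt =>
          if PySem.Set.contains visited nxt then acc
          else acc ++ [(((adj.getD nxt []).countP (fun nn => !(PySem.Set.contains visited nn)) : Int), nxt)]) []
      let neighbors := PySem.List.sorted2 neighbors (·.1) (·.2)
      neighbors.findSome? (fun p => pvDfs adj n fuel p.2 path visited)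

-- the common tail of both versions: run dfs from node 0 and map path indices back
def pvRunDfs (triangulations : List (List (Int × Int))) (adj : PySem.Dict Int (List Int)) :
    List (List (Int × Int)) :=
  let n : Int := PySem.List.len triangulations
  match pvDfs adj n triangulations.length 0 [] PySem.Set.empty with
  | some p => p.map (fun i => PySem.List.pyGetD triangulations i [])
  | none => []

-- len(set_i.intersection(set_j)) == len(set_i) - 1
def pvCondA (triangulations : List (List (Int × Int))) (i j : Int) : Bool :=
  let si := PySem.Set.ofList (PySem.List.pyGetD triangulations i [])
  let sj := PySem.Set.ofList (PySem.List.pyGetD triangulations j [])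
  ((PySem.Set.inter si sj).length : Int) == ((si.length : Int) - 1)

def pvAdjA (triangulations : List (List (Int × Int))) (n : Int) : PySem.Dict Int (List Int) :=
  let adj0 := (PySem.List.pyRange 0 n 1).foldl (fun d i => d.insert i []) PySem.Dict.empty
  (PySem.List.pyRange 0 n 1).foldl (fun adj i =>
    (PySem.List.pyRange (i+1) n 1).foldl (fun adj j =>
      if pvCondA triangulations i j then
        (adj.modify i [] (· ++ [j])).modify j [] (· ++ [i])
      else adj) adj) adj0

def find_flip_gray_code (triangulations : List (List (Int × Int))) : List (List (Int × Int)) :=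
  if triangulations.isEmpty then []
  else
    let n : Int := PySem.List.len triangulations
    let adj := pvAdjA triangulations n
    pvRunDfs triangulations adj

-- ===== PORT B =====

-- occ[d] = occ.get(d, []) + [idx] over the distinct diagonals of each triangulation,
-- together with sizes.append(len(distinct))
def pvOccSizes (triangulations : List (List (Int × Int))) :
    PySem.Dict (Int × Int) (List Int) × List Int :=
  (PySem.List.enumerate triangulations 0).foldl (fun st p =>
    let distinct := PySem.List.dedup p.2
    ((distinct.foldl (fun occ d => occ.modify d [] (· ++ [p.1])) st.1),
     st.2 ++ [(distinct.length : Int)])) (PySem.Dict.empty, [])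

-- while rest: x, rest = rest[0], rest[1:]; for y in rest: cnt[(x,y)] = cnt.get((x,y),0)+1
def pvPairCount (cnt : PySem.Dict (Int × Int) Int) : List Int → PySem.Dict (Int × Int) Int
  | [] => cnt
  | x :: rest =>
    pvPairCount (rest.foldl (fun cnt y => cnt.modify (x, y) 0 (· + 1)) cnt) rest

-- cnt.get((i, j), 0) == sizes[i] - 1
def pvCondB (cnt : PySem.Dict (Int × Int) Int) (sizes : List Int) (i j : Int) : Bool :=
  cnt.getD (i, j) 0 == PySem.List.pyGetD sizes i 0 - 1

def pvAdjB (cnt : PySem.Dict (Int × Int) Int) (sizes : List Int) (n : Int) :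
    PySem.Dict Int (List Int) :=
  let adj0 := (PySem.List.pyRange 0 n 1).foldl (fun d i => d.insert i []) PySem.Dict.empty
  (PySem.List.pyRange 0 n 1).foldl (fun adj i =>
    (PySem.List.pyRange (i+1) n 1).foldl (fun adj j =>
      if pvCondB cnt sizes i j then
        (adj.modify i [] (· ++ [j])).modify j [] (· ++ [i])
      else adj) adj) adj0

def find_flip_gray_code_alt (triangulations : List (List (Int × Int))) : List (List (Int × Int)) :=
  if triangulations.isEmpty then []
  else
    let n : Int := PySem.List.len triangulations
    let os := pvOccSizes triangulations
    let cnt := os.1.values.foldl pvPairCount PySem.Dict.empty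
    let adj := pvAdjB cnt os.2 n
    pvRunDfs triangulations adj

-- ===== PRECONDITION & SPEC =====
def Spec_find_flip_gray_code (triangulations : List (List (Int × Int))) (out : List (List (Int × Int))) : Prop := out = find_flip_gray_code_alt triangulations
instance (triangulations : List (List (Int × Int))) (out : List (List (Int × Int))) : Decidable (Spec_find_flip_gray_code triangulations out) := by unfold Spec_find_flip_gray_code; infer_instance

-- ===== CLAIM (what is proved, stated in full; the proofs are below) =====
def Claim_equal_find_flip_gray_code : Prop := ∀ (triangulations : List (List (Int × Int))), Dom_find_flip_gray_code triangulations → Spec_find_flip_gray_code triangulations (find_flip_gray_code triangulations)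

-- ===== LEMMAS AND PROOFS =====

-- the nested occ-building fold, as a named function for the induction
def pvOccFold (L : List (Int × List (Int × Int))) (D : PySem.Dict (Int × Int) (List Int)) :
    PySem.Dict (Int × Int) (List Int) :=
  L.foldl (fun occ p =>
    (PySem.List.dedup p.2).foldl (fun occ d => occ.modify d [] (· ++ [p.1])) occ) D

-- the ascending list of indices of the triangulations containing a diagonal d
def pvIdxList (tris : List (List (Int × Int))) (d : Int × Int) : List Int :=
  ((PySem.List.enumerate tris 0).filter (fun p => decide (d ∈ p.2))).map (·.1)

-- the two accumulators of pvOccSizes are independent: split the fold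
theorem pv_fold_pair (L : List (Int × List (Int × Int)))
    (occ0 : PySem.Dict (Int × Int) (List Int)) (sz0 : List Int) :
    L.foldl (fun st p =>
      let distinct := PySem.List.dedup p.2
      ((distinct.foldl (fun occ d => occ.modify d [] (· ++ [p.1])) st.1),
       st.2 ++ [(distinct.length : Int)])) (occ0, sz0)
    = (pvOccFold L occ0,
       sz0 ++ L.map (fun p => ((PySem.List.dedup p.2).length : Int))) := by
  induction L generalizing occ0 sz0 with
  | nil => simp [pvOccFold]
  | cons p T ih =>
    rw [List.foldl_cons, pvOccFold, List.foldl_cons, ← pvOccFold]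
    rw [ih]; simp

theorem pv_occSizes_eq (tris : List (List (Int × Int))) :
    pvOccSizes tris =
      (pvOccFold (PySem.List.enumerate tris 0) PySem.Dict.empty,
       tris.map (fun t => ((PySem.List.dedup t).length : Int))) := by
  unfold pvOccSizes
  rw [pv_fold_pair]
  congr 1
  conv_rhs => rw [← PySem.List.map_snd_enumerate tris 0]
  rw [List.map_map]
  simp [Function.comp]

theorem pv_filter_beq_nodup {α : Type} [BEq α] [LawfulBEq α] (l : List α) (d : α) (h : l.Nodup) :
    l.filter (fun x => x == d) = if d ∈ l then [d] else [] := by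
  induction l with
  | nil => simp
  | cons x t ih =>
    simp only [List.nodup_cons] at h
    by_cases hxd : x = d
    · subst hxd
      have : x ∉ t := h.1
      simp [this, List.filter_eq_nil_iff]
      intro a ha hax
      exact this (hax ▸ ha)
    · simp [hxd, ih h.2, Ne.symm hxd]

-- effect of one triangulation's inner loop on a single occ entry
theorem pv_inner (t : List (Int × Int)) (i : Int) (occ : PySem.Dict (Int × Int) (List Int)) (d : Int × Int) :
    ((PySem.List.dedup t).foldl (fun occ d' => occ.modify d' [] (· ++ [i])) occ).getD d []
      = occ.getD d [] ++ (if d ∈ t then [i] else []) := by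
  have h1 : (PySem.List.dedup t).foldl (fun occ d' => occ.modify d' [] (· ++ [i])) occ
      = ((PySem.List.dedup t).map (fun d' => (d', i))).foldl (fun occ p => occ.modify p.1 [] (· ++ [p.2])) occ := by
    rw [List.foldl_map]
  rw [h1, PySem.Dict.getD_foldl_modify_append]
  congr 1
  rw [List.filter_map]
  have h2 : (PySem.List.dedup t).filter ((fun p => p.1 == d) ∘ (fun d' => (d', i)))
      = (PySem.List.dedup t).filter (fun x => x == d) := by
    apply List.filter_congr; intro x _; rfl
  rw [h2, pv_filter_beq_nodup _ _ (PySem.List.nodup_dedup t)]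
  by_cases hd : d ∈ t <;> simp [hd]

theorem pv_occFold_getD (L : List (Int × List (Int × Int))) (D : PySem.Dict (Int × Int) (List Int)) (d : Int × Int) :
    (pvOccFold L D).getD d []
      = D.getD d [] ++ (L.filter (fun p => decide (d ∈ p.2))).map (·.1) := by
  induction L generalizing D with
  | nil => simp [pvOccFold]
  | cons p T ih =>
    rw [pvOccFold, List.foldl_cons, ← pvOccFold, ih, pv_inner]
    by_cases hd : d ∈ p.2 <;> simp [hd]

theorem pv_occFold_keys_nodup (L : List (Int × List (Int × Int))) (D : PySem.Dict (Int × Int) (List Int))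
    (h : D.keys.Nodup) : (pvOccFold L D).keys.Nodup := by
  induction L generalizing D with
  | nil => simpa [pvOccFold]
  | cons p T ih =>
    rw [pvOccFold, List.foldl_cons, ← pvOccFold]
    apply ih
    exact PySem.Dict.nodup_keys_foldl_modify_key (PySem.List.dedup p.2) (fun d => d) []
      (fun _ _ => (· ++ [p.1])) D h

theorem pv_occFold_mem_keys (L : List (Int × List (Int × Int))) (D : PySem.Dict (Int × Int) (List Int)) (d : Int × Int) :
    d ∈ (pvOccFold L D).keys ↔ d ∈ D.keys ∨ ∃ p ∈ L, d ∈ p.2 := by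
  induction L generalizing D with
  | nil => simp [pvOccFold]
  | cons p T ih =>
    rw [pvOccFold, List.foldl_cons, ← pvOccFold, ih]
    have : ((PySem.List.dedup p.2).foldl (fun occ d => occ.modify d [] (· ++ [p.1])) D).keys
        = PySem.Set.update D.keys (PySem.List.dedup p.2) :=
      PySem.Dict.keys_foldl_modify (PySem.List.dedup p.2) [] (fun _ _ => (· ++ [p.1])) D
    rw [this]
    simp [PySem.Set.mem_update]
    tauto

theorem pv_idxList_pairwise (tris : List (List (Int × Int))) (d : Int × Int) :
    (pvIdxList tris d).Pairwise (· < ·) := by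
  unfold pvIdxList
  rw [List.pairwise_map]
  exact (PySem.List.pairwise_lt_enumerate tris 0).filter _

theorem pv_idxList_mem (tris : List (List (Int × Int))) (d : Int × Int) (i : Int)
    (hi : 0 ≤ i) (hin : i < (tris.length : Int)) :
    i ∈ pvIdxList tris d ↔ d ∈ tris[i.toNat]'(by omega) := by
  unfold pvIdxList
  simp only [List.mem_map, List.mem_filter, PySem.List.mem_enumerate_iff]
  constructor
  · rintro ⟨p, ⟨⟨k, hk, rfl⟩, hd⟩, rfl⟩
    simp only [zero_add] at *
    simp only [Int.toNat_natCast]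
    simpa using of_decide_eq_true hd
  · intro hd
    refine ⟨(i, tris[i.toNat]'(by omega)),
      ⟨⟨i.toNat, by omega, by simp [Prod.ext_iff]; omega⟩, by simpa using hd⟩, rfl⟩

-- counting one bucket's pairs: the (i, j) entry grows by 1 iff i and j both occur
theorem pv_paircount_getD (lst : List Int) (cnt : PySem.Dict (Int × Int) Int)
    (i j : Int) (hij : i < j) (h : lst.Pairwise (· < ·)) :
    (pvPairCount cnt lst).getD (i, j) 0
      = cnt.getD (i, j) 0 + (if i ∈ lst ∧ j ∈ lst then 1 else 0) := by
  induction lst generalizing cnt with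
  | nil => simp [pvPairCount]
  | cons x rest ih =>
    rw [pvPairCount]
    have hpw := (List.pairwise_cons.mp h).1
    have htail := (List.pairwise_cons.mp h).2
    rw [ih _ htail]
    have hfold : (rest.foldl (fun cnt y => cnt.modify (x, y) 0 (· + 1)) cnt).getD (i, j) 0
        = cnt.getD (i, j) 0 + (rest.map (fun y => (x, y))).count (i, j) := by
      rw [show rest.foldl (fun cnt y => cnt.modify (x, y) 0 (· + 1)) cnt
            = (rest.map (fun y => (x, y))).foldl (fun cnt p => cnt.modify p 0 (· + 1)) cnt from
          (List.foldl_map (f := fun y => (x, y)) (g := fun cnt p => cnt.modify p 0 (· + 1))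
            (l := rest) (init := cnt)).symm]
      exact PySem.Dict.getD_foldl_modify_add_one _ _ _
    rw [hfold]
    have hnd : rest.Nodup := htail.nodup
    have hxnotin : x ∉ rest := fun hx => lt_irrefl x (hpw x hx)
    by_cases hx : x = i
    · subst hx
      have hji : j ≠ x := ne_of_gt hij
      have hcount : (rest.map (fun y => (x, y))).count (x, j) = rest.count j :=
        List.count_map_of_injective _ _ (fun a b hab => by simpa using hab) _
      rw [hcount]
      by_cases hj : j ∈ rest
      · rw [List.count_eq_one_of_mem hnd hj]
        simp [List.mem_cons, hj, hxnotin, hji]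
      · rw [List.count_eq_zero.mpr hj]
        simp [List.mem_cons, hj, hxnotin, hji]
    · have hc0 : (rest.map (fun y => (x, y))).count (i, j) = 0 := by
        rw [List.count_eq_zero]
        intro hmem
        rcases List.mem_map.mp hmem with ⟨y, _, hy⟩
        exact hx (congrArg Prod.fst hy)
      rw [hc0]
      by_cases hjx : j = x
      · have hinotin : i ∉ rest := fun hi => absurd (hpw i hi) (by omega)
        simp [List.mem_cons, hjx, hinotin, Ne.symm hx]
      · simp [List.mem_cons, Ne.symm hx, hjx]

-- counting over all buckets
theorem pv_paircount_fold (vs : List (List Int)) (cnt : PySem.Dict (Int × Int) Int)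
    (i j : Int) (hij : i < j) (h : ∀ l ∈ vs, l.Pairwise (· < ·)) :
    (vs.foldl pvPairCount cnt).getD (i, j) 0
      = cnt.getD (i, j) 0 + (vs.countP (fun l => decide (i ∈ l) && decide (j ∈ l)) : Int) := by
  induction vs generalizing cnt with
  | nil => simp
  | cons l T ih =>
    rw [List.foldl_cons, ih _ (fun l hl => h l (List.mem_cons_of_mem _ hl)),
        pv_paircount_getD l cnt i j hij (h l List.mem_cons_self)]
    rw [List.countP_cons]
    by_cases hl : i ∈ l ∧ j ∈ l
    · simp [hl.1, hl.2]; omega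
    · have : (decide (i ∈ l) && decide (j ∈ l)) = false := by
        rcases not_and_or.mp hl with h' | h' <;> simp [h']
      simp [hl, this]

-- the crux: the two flip conditions agree on every valid index pair i < j
theorem pv_cond_eq (tris : List (List (Int × Int))) (i j : Int)
    (hi : 0 ≤ i) (hij : i < j) (hj : j < (tris.length : Int)) :
    pvCondA tris i j
      = pvCondB ((pvOccFold (PySem.List.enumerate tris 0) PySem.Dict.empty).values.foldl
            pvPairCount PySem.Dict.empty)
          (tris.map (fun t => ((PySem.List.dedup t).length : Int))) i j := by
  have hiN : i.toNat < tris.length := by omega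
  have hjN : j.toNat < tris.length := by omega
  set occ := pvOccFold (PySem.List.enumerate tris 0) PySem.Dict.empty with hocc
  have hnd : occ.keys.Nodup := pv_occFold_keys_nodup _ _ (by simp)
  have hvals : occ.values = occ.keys.map (fun k => occ.getD k []) :=
    PySem.Dict.values_eq_map_keys occ hnd []
  have hgetD : ∀ d, occ.getD d [] = pvIdxList tris d := by
    intro d; rw [hocc, pv_occFold_getD]; simp [pvIdxList]
  have hpw : ∀ l ∈ occ.values, l.Pairwise (· < ·) := by
    intro l hl
    rw [hvals] at hl
    rcases List.mem_map.mp hl with ⟨k, _, rfl⟩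
    rw [hgetD]; exact pv_idxList_pairwise tris k
  have hcnt : (occ.values.foldl pvPairCount PySem.Dict.empty).getD (i, j) 0
      = (occ.values.countP (fun l => decide (i ∈ l) && decide (j ∈ l)) : Int) := by
    rw [pv_paircount_fold _ _ _ _ hij hpw]; simp
  have hcntP : occ.values.countP (fun l => decide (i ∈ l) && decide (j ∈ l))
      = occ.keys.countP (fun d => decide (d ∈ tris[i.toNat]) && decide (d ∈ tris[j.toNat])) := by
    rw [hvals, List.countP_map]
    apply List.countP_congr
    intro d _
    simp [Function.comp, hgetD, pv_idxList_mem tris d i hi (by omega),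
      pv_idxList_mem tris d j (by omega) hj]
  have hTi : PySem.List.pyGetD tris i [] = tris[i.toNat] :=
    PySem.List.pyGetD_eq_getElem tris [] hi (by omega)
  have hTj : PySem.List.pyGetD tris j [] = tris[j.toNat] :=
    PySem.List.pyGetD_eq_getElem tris [] (by omega) (by omega)
  have hlen : (occ.keys.countP (fun d => decide (d ∈ tris[i.toNat]) && decide (d ∈ tris[j.toNat])))
      = (PySem.Set.inter (PySem.Set.ofList tris[i.toNat]) (PySem.Set.ofList tris[j.toNat])).length := by
    rw [List.countP_eq_length_filter]
    apply List.Perm.length_eq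
    rw [List.perm_ext_iff_of_nodup (hnd.filter _)
      (PySem.Set.nodup_inter _ _ (PySem.Set.nodup_ofList _))]
    intro a
    simp only [List.mem_filter, PySem.Set.mem_inter, PySem.Set.mem_ofList, Bool.and_eq_true,
      decide_eq_true_eq]
    constructor
    · rintro ⟨_, h1, h2⟩; exact ⟨h1, h2⟩
    · rintro ⟨h1, h2⟩
      refine ⟨?_, h1, h2⟩
      rw [hocc, pv_occFold_mem_keys]
      right
      exact ⟨(0 + (i.toNat : Int), tris[i.toNat]),
        (PySem.List.mem_enumerate_iff _ _ _).mpr ⟨i.toNat, hiN, rfl⟩, h1⟩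
  have hsz : PySem.List.pyGetD (tris.map (fun t => ((PySem.List.dedup t).length : Int))) i 0
      = ((PySem.List.dedup tris[i.toNat]).length : Int) := by
    rw [PySem.List.pyGetD_eq_getElem _ 0 hi (by simp; omega)]
    simp
  unfold pvCondA pvCondB
  rw [hcnt, hcntP, hlen, hsz, hTi, hTj]
  simp

-- the two adjacency dicts agree
theorem pv_adj_eq (tris : List (List (Int × Int))) :
    pvAdjA tris (PySem.List.len tris)
      = pvAdjB ((pvOccFold (PySem.List.enumerate tris 0) PySem.Dict.empty).values.foldl
            pvPairCount PySem.Dict.empty)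
          (tris.map (fun t => ((PySem.List.dedup t).length : Int)))
          (PySem.List.len tris) := by
  unfold pvAdjA pvAdjB
  apply PySem.List.foldl_congr_mem
  intro adj i hi
  apply PySem.List.foldl_congr_mem
  intro adj' j hj
  rw [PySem.List.mem_pyRange_one] at hi hj
  simp only [PySem.List.len_eq] at hi hj
  rw [pv_cond_eq tris i j hi.1 (by omega) (by omega)]

-- ===== VERDICT (by name: the statement is the Claim_ definition above) =====
theorem find_flip_gray_code_spec : Claim_equal_find_flip_gray_code := by
  intro tris _
  unfold Spec_find_flip_gray_code find_flip_gray_code find_flip_gray_code_alt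
  by_cases h : tris.isEmpty
  · simp [h]
  · simp only [h, if_neg, Bool.false_eq_true, not_false_iff]
    rw [pv_occSizes_eq]
    rw [← pv_adj_eq]
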